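-- pv_equiv track=rewrite | github.com/yggdrasil-au/RemakeEngine | reverse_engineering/oldd/Audio/mus/script/s1/mus_analyzer_py_typed.py | analyze_block_structure
-- ===== SOURCE A (Python) =====
-- def analyze_block_structure(data, min_zero_size):
--   """
--   Analyzes data for non-zero blocks followed by zero blocks.
--
--   Returns:
--       A dictionary containing lists of data block lengths, zero block lengths,
--       and data-zero pair lengths.
--   """
--   blocks = []
--   current_pos = 0
--   if not data: # Handle empty data
--       return {
--           'data_block_lengths': [],
--           'zero_block_lengths': [],
--           'data_zero_pairs_combined_lengths': []
--       }
--
--   in_zero_block = data[0] == 0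
--   block_start = 0
--
--   while current_pos < len(data):
--     byte = data[current_pos]
--     is_zero = (byte == 0)
--
--     if is_zero != in_zero_block:
--       # State changed (data -> zero or zero -> data)
--       block_len = current_pos - block_start
--       if block_len > 0: # Only record non-empty blocks
--           if in_zero_block:
--             # Just finished a zero block
--             if block_len >= min_zero_size:
--               blocks.append({'type': 'zero', 'start': block_start, 'length': block_len})
--             # else: Ignore short zero sequences for now
--           else:
--             # Just finished a data block
--             blocks.append({'type': 'data', 'start': block_start, 'length': block_len})
--
--       block_start = current_pos
--       in_zero_block = is_zero
--
--     current_pos += 1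
--
--   # Add the last block
--   block_len = len(data) - block_start
--   if block_len > 0:
--       if in_zero_block:
--           if block_len >= min_zero_size:
--               blocks.append({'type': 'zero', 'start': block_start, 'length': block_len})
--       else:
--           blocks.append({'type': 'data', 'start': block_start, 'length': block_len})
--
--   # --- Analyze the detected blocks ---
--   analysis = {
--       'data_block_lengths': [],
--       'zero_block_lengths': [],
--       'data_zero_pairs_combined_lengths': [] # Store combined lengths directly
--   }
--   for i in range(len(blocks)):
--       block = blocks[i]
--       if block['type'] == 'data':
--           analysis['data_block_lengths'].append(block['length'])
--           # Check if the next block is a zero block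
--           if i + 1 < len(blocks) and blocks[i+1]['type'] == 'zero':
--               combined_len = block['length'] + blocks[i+1]['length']
--               analysis['data_zero_pairs_combined_lengths'].append(combined_len)
--       elif block['type'] == 'zero':
--           analysis['zero_block_lengths'].append(block['length'])
--
--   return analysis
-- ===== SOURCE B (Python) =====
-- def analyze_block_structure(data, min_zero_size):
--     # Chunk the input into maximal runs (one slice step per run) instead of a
--     # byte-at-a-time state machine, then summarize with comprehensions.
--     blocks = []
--     rest = data
--     while rest:
--         z = (rest[0] == 0)
--         k = 1
--         while k < len(rest) and (rest[k] == 0) == z: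
--             k += 1
--         if z:
--             if k >= min_zero_size:
--                 blocks.append(('zero', k))
--         else:
--             blocks.append(('data', k))
--         rest = rest[k:]
--     return {
--         'data_block_lengths': [n for t, n in blocks if t == 'data'],
--         'zero_block_lengths': [n for t, n in blocks if t == 'zero'],
--         'data_zero_pairs_combined_lengths': [a + b for (t1, a), (t2, b) in zip(blocks, blocks[1:]) if t1 == 'data' and t2 == 'zero'],
--     }
-- ===== Notes on version B (the rewrite author's own statement) =====
-- stated objective: idiomatic
-- what changed: Replaces the byte-at-a-time state machine (current_pos/block_start/in_zero_block) and the index-based second loop with a run-chunking loop (one slice per maximal run) followed by list comprehensions (filters and a zip over adjacent blocks).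
import Mathlib
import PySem

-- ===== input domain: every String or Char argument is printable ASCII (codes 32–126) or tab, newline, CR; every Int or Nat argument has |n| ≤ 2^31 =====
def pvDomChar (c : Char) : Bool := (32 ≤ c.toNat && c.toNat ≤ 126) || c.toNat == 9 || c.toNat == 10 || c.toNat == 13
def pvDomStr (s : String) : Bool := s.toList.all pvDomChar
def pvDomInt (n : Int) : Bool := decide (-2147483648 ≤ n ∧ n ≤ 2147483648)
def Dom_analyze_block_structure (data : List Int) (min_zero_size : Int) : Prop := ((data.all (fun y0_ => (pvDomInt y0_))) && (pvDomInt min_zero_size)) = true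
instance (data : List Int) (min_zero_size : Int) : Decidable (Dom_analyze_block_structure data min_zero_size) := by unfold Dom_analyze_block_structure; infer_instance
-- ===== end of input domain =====

-- B replaces A's byte-at-a-time state machine and index-based second loop by a
-- run-chunking recursion plus filter/zip comprehensions (idiomatic, same cost).

-- ===== PORT A =====
-- state: (current_pos, block_start, in_zero_block, blocks); a block is (type, start, length)
def aStep (m : Int) (s : Int × Int × Bool × List (String × Int × Int)) (byte : Int) :
    Int × Int × Bool × List (String × Int × Int) :=
  let (pos, bstart, inz, blocks) := s
  let isz := byte == 0
  if isz != inz then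
    let blen := pos - bstart
    let blocks' :=
      if blen > 0 then
        (if inz then (if blen ≥ m then blocks ++ [("zero", bstart, blen)] else blocks)
         else blocks ++ [("data", bstart, blen)])
      else blocks
    (pos + 1, pos, isz, blocks')
  else
    (pos + 1, bstart, inz, blocks)

-- the `for i in range(len(blocks))` analysis loop; acc = the three result lists
def aStep2 (blocks : List (String × Int × Int)) (acc : List Int × List Int × List Int) (i : Nat) :
    List Int × List Int × List Int :=
  let b := blocks.getD i ("", 0, 0)
  if b.1 == "data" then
    let pl :=
      if decide (i + 1 < blocks.length) && ((blocks.getD (i + 1) ("", 0, 0)).1 == "zero") then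
        acc.2.2 ++ [b.2.2 + (blocks.getD (i + 1) ("", 0, 0)).2.2]
      else acc.2.2
    (acc.1 ++ [b.2.2], acc.2.1, pl)
  else if b.1 == "zero" then
    (acc.1, acc.2.1 ++ [b.2.2], acc.2.2)
  else acc

def analyze_block_structure (data : List Int) (min_zero_size : Int) : List (String × List Int) :=
  if data.isEmpty then
    [("data_block_lengths", []), ("zero_block_lengths", []), ("data_zero_pairs_combined_lengths", [])]
  else
    let inz0 := (data.headD 0) == 0        -- data[0] == 0 (data nonempty here)
    let s := data.foldl (aStep min_zero_size) (0, 0, inz0, [])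
    let bstart := s.2.1
    let inz := s.2.2.1
    let blocks0 := s.2.2.2
    let blen := (data.length : Int) - bstart
    let blocks :=
      if blen > 0 then
        (if inz then (if blen ≥ min_zero_size then blocks0 ++ [("zero", bstart, blen)] else blocks0)
         else blocks0 ++ [("data", bstart, blen)])
      else blocks0
    let fin := (List.range blocks.length).foldl (aStep2 blocks) ([], [], [])
    [("data_block_lengths", fin.1), ("zero_block_lengths", fin.2.1),
     ("data_zero_pairs_combined_lengths", fin.2.2)]

-- ===== PORT B =====
-- one (type, length) block per maximal run; k = 1 + matching prefix of the tail
def altBlocks (m : Int) : List Int → List (String × Int)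
  | [] => []
  | b :: t =>
    let z := b == 0
    let k : Int := (t.takeWhile (fun x => (x == 0) == z)).length + 1
    let rest := t.dropWhile (fun x => (x == 0) == z)
    (if z then (if k ≥ m then [("zero", k)] else []) else [("data", k)]) ++ altBlocks m rest
termination_by l => l.length
decreasing_by
  simpa using Nat.lt_succ_of_le (List.length_dropWhile_le _ _)

def analyze_block_structure_alt (data : List Int) (min_zero_size : Int) : List (String × List Int) :=
  let blocks := altBlocks min_zero_size data
  [("data_block_lengths", (blocks.filter (fun b => b.1 == "data")).map (fun b => b.2)),
   ("zero_block_lengths", (blocks.filter (fun b => b.1 == "zero")).map (fun b => b.2)),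
   ("data_zero_pairs_combined_lengths",
     (blocks.zip blocks.tail).filterMap
       (fun p => if p.1.1 == "data" && p.2.1 == "zero" then some (p.1.2 + p.2.2) else none))]

-- ===== PRECONDITION & SPEC =====
def Spec_analyze_block_structure (data : List Int) (min_zero_size : Int) (out : List (String × List Int)) : Prop := out = analyze_block_structure_alt data min_zero_size
instance (data : List Int) (min_zero_size : Int) (out : List (String × List Int)) : Decidable (Spec_analyze_block_structure data min_zero_size out) := by unfold Spec_analyze_block_structure; infer_instance

-- ===== CLAIM (what is proved, stated in full; the proofs are below) =====
def Claim_equal_analyze_block_structure : Prop := ∀ (data : List Int) (min_zero_size : Int), Dom_analyze_block_structure data min_zero_size → Spec_analyze_block_structure data min_zero_size (analyze_block_structure data min_zero_size)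

-- ===== LEMMAS AND PROOFS =====

def mkBlk (m : Int) (z : Bool) (start len : Int) : List (String × Int × Int) :=
  if len > 0 then (if z then (if len ≥ m then [("zero", start, len)] else []) else [("data", start, len)]) else []

def specBlocks (m : Int) (z : Bool) (start c : Int) : List Int → List (String × Int × Int)
  | [] => mkBlk m z start c
  | b :: rest =>
    if (b == 0) == z then specBlocks m z start (c + 1) rest
    else mkBlk m z start c ++ specBlocks m (b == 0) (start + c) 1 rest

lemma append_mkBlk (m : Int) (z : Bool) (start len : Int) (bs : List (String × Int × Int)) :
    (if len > 0 then
        (if z then (if len ≥ m then bs ++ [("zero", start, len)] else bs)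
         else bs ++ [("data", start, len)])
      else bs) = bs ++ mkBlk m z start len := by
  unfold mkBlk; split_ifs <;> simp

lemma aFold_spec (m : Int) : ∀ (data : List Int) (z : Bool) (start c : Int) (bs : List (String × Int × Int)),
    (data.foldl (aStep m) (start + c, start, z, bs)).1 = start + c + data.length ∧
    (data.foldl (aStep m) (start + c, start, z, bs)).2.2.2 ++
      mkBlk m (data.foldl (aStep m) (start + c, start, z, bs)).2.2.1
        (data.foldl (aStep m) (start + c, start, z, bs)).2.1
        ((data.foldl (aStep m) (start + c, start, z, bs)).1 -
          (data.foldl (aStep m) (start + c, start, z, bs)).2.1)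
      = bs ++ specBlocks m z start c data := by
  intro data
  induction data with
  | nil =>
    intro z start c bs
    simp [specBlocks]
  | cons b rest ih =>
    intro z start c bs
    by_cases h : (b == 0) = z
    · have step : aStep m (start + c, start, z, bs) b = (start + (c + 1), start, z, bs) := by
        simp [aStep, h]; ring
      have := ih z start (c + 1) bs
      simp only [List.foldl_cons, step]
      refine ⟨?_, ?_⟩
      · rw [this.1]; simp only [List.length_cons]; push_cast; ring
      · rw [this.2]; simp [specBlocks, h]
    · have step : aStep m (start + c, start, z, bs) b =
          ((start + c) + 1, start + c, (b == 0), bs ++ mkBlk m z start c) := by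
        simp only [aStep, bne]
        rw [show start + c - start = c by ring, append_mkBlk]
        simp [h]
      have := ih (b == 0) (start + c) 1 (bs ++ mkBlk m z start c)
      simp only [List.foldl_cons, step]
      refine ⟨?_, ?_⟩
      · rw [this.1]; simp only [List.length_cons]; push_cast; ring
      · rw [this.2]; simp [specBlocks, h]

def mkB (m : Int) (z : Bool) (len : Int) : List (String × Int) :=
  if len > 0 then (if z then (if len ≥ m then [("zero", len)] else []) else [("data", len)]) else []

def cf (m : Int) (z : Bool) (c : Int) : List Int → List (String × Int)
  | [] => mkB m z c
  | b :: rest =>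
    if (b == 0) == z then cf m z (c + 1) rest
    else mkB m z c ++ cf m (b == 0) 1 rest

lemma mkBlk_proj (m : Int) (z : Bool) (start len : Int) :
    (mkBlk m z start len).map (fun b => (b.1, b.2.2)) = mkB m z len := by
  unfold mkBlk mkB; split_ifs <;> simp

lemma spec_proj (m : Int) : ∀ (data : List Int) (z : Bool) (start c : Int),
    (specBlocks m z start c data).map (fun b => (b.1, b.2.2)) = cf m z c data := by
  intro data
  induction data with
  | nil => intro z start c; simp [specBlocks, cf, mkBlk_proj]
  | cons b rest ih =>
    intro z start c
    by_cases h : (b == 0) = z <;>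
      simp [specBlocks, cf, h, ih, mkBlk_proj]

lemma mkB_pos (m : Int) (z : Bool) (len : Int) (h : len > 0) :
    (if z then (if len ≥ m then [("zero", len)] else []) else [("data", len)]) = mkB m z len := by
  unfold mkB; rw [if_pos h]

lemma cf_alt (m : Int) : ∀ (data : List Int) (z : Bool) (c : Int), 1 ≤ c →
    cf m z c data =
      mkB m z (c + ((data.takeWhile (fun x => (x == 0) == z)).length : Int)) ++
        altBlocks m (data.dropWhile (fun x => (x == 0) == z)) := by
  intro data
  induction data with
  | nil => intro z c _; simp [cf, altBlocks]
  | cons b rest ih =>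
    intro z c hc
    by_cases h : (b == 0) = z
    · have hp : ((b == 0) == z) = true := by simp [h]
      rw [List.takeWhile_cons_of_pos (p := fun x => (x == 0) == z) (l := rest) hp,
        List.dropWhile_cons_of_pos (p := fun x => (x == 0) == z) (l := rest) hp]
      simp only [cf, hp, if_pos]
      rw [ih z (c + 1) (by omega)]
      congr 2
      simp only [List.length_cons]
      push_cast
      ring
    · have hp : ((b == 0) == z) = false := by simp [h]
      rw [List.takeWhile_cons_of_neg (p := fun x => (x == 0) == z) (l := rest) (by simp [hp]),
        List.dropWhile_cons_of_neg (p := fun x => (x == 0) == z) (l := rest) (by simp [hp])]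
      simp only [cf, hp, Bool.false_eq_true, if_false, List.length_nil, Int.ofNat_zero, add_zero]
      congr 1
      rw [ih (b == 0) 1 (le_refl 1), altBlocks]
      rw [mkB_pos m (b == 0) (((rest.takeWhile (fun x => (x == 0) == (b == 0))).length : Int) + 1)
        (by omega)]
      congr 2
      ring

lemma cf_alt_top (m : Int) (d : Int) (t : List Int) :
    cf m (d == 0) 0 (d :: t) = altBlocks m (d :: t) := by
  rw [cf, if_pos (by simp), show (0 : Int) + 1 = 1 from by ring,
    cf_alt m t (d == 0) 1 (le_refl 1), altBlocks]
  rw [mkB_pos m (d == 0) (((t.takeWhile (fun x => (x == 0) == (d == 0))).length : Int) + 1)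
    (by omega)]
  congr 2
  ring

-- structural versions of the second loop's three accumulators
def DL : List (String × Int × Int) → List Int
  | [] => []
  | b :: rest => (if b.1 == "data" then [b.2.2] else []) ++ DL rest

def ZL : List (String × Int × Int) → List Int
  | [] => []
  | b :: rest => (if b.1 == "data" then [] else if b.1 == "zero" then [b.2.2] else []) ++ ZL rest

def PL : List (String × Int × Int) → List Int
  | [] => []
  | b :: rest =>
    (if b.1 == "data" && (decide (0 < rest.length) && ((rest.getD 0 ("", 0, 0)).1 == "zero")) then
        [b.2.2 + (rest.getD 0 ("", 0, 0)).2.2]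
      else []) ++ PL rest

lemma aStep2_shift (b : String × Int × Int) (rest : List (String × Int × Int))
    (acc : List Int × List Int × List Int) (i : Nat) :
    aStep2 (b :: rest) acc (i + 1) = aStep2 rest acc i := by
  simp [aStep2]

lemma aAn_spec : ∀ (blocks : List (String × Int × Int)) (dl zl pl : List Int),
    (List.range blocks.length).foldl (aStep2 blocks) (dl, zl, pl) =
      (dl ++ DL blocks, zl ++ ZL blocks, pl ++ PL blocks) := by
  intro blocks
  induction blocks with
  | nil => intro dl zl pl; simp [DL, ZL, PL]
  | cons b rest ih =>
    intro dl zl pl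
    have hrange : List.range (b :: rest).length = 0 :: (List.range rest.length).map Nat.succ := by
      simp [List.range_succ_eq_map]
    rw [hrange, List.foldl_cons, List.foldl_map]
    have hfun : (fun (acc : List Int × List Int × List Int) (i : Nat) =>
        aStep2 (b :: rest) acc (Nat.succ i)) = aStep2 rest := by
      funext acc i
      exact aStep2_shift b rest acc i
    rw [hfun]
    have hhead : aStep2 (b :: rest) (dl, zl, pl) 0 =
        (dl ++ (if b.1 == "data" then [b.2.2] else []),
         zl ++ (if b.1 == "data" then [] else if b.1 == "zero" then [b.2.2] else []),
         pl ++ (if b.1 == "data" && (decide (0 < rest.length) && ((rest.getD 0 ("", 0, 0)).1 == "zero")) then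
                  [b.2.2 + (rest.getD 0 ("", 0, 0)).2.2] else [])) := by
      simp only [aStep2, List.getD_cons_zero, List.getD_cons_succ, List.length_cons,
        Nat.succ_lt_succ_iff, Nat.zero_add]
      cases rest with
      | nil =>
        by_cases hd : b.1 == "data" <;> by_cases hz : b.1 == "zero" <;> simp [hd, hz]
      | cons nb r =>
        simp only [List.getD_cons_zero, List.length_cons]
        by_cases hd : b.1 == "data" <;> by_cases hz : nb.1 == "zero" <;>
          by_cases hb : b.1 == "zero" <;> simp [hd, hz, hb]
    rw [hhead, ih]
    simp [DL, ZL, PL, List.append_assoc]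

lemma DL_proj : ∀ (bs : List (String × Int × Int)),
    DL bs = ((bs.map (fun b => (b.1, b.2.2))).filter (fun b => b.1 == "data")).map (fun b => b.2) := by
  intro bs
  induction bs with
  | nil => simp [DL]
  | cons b rest ih =>
    by_cases h : b.1 == "data" <;> simp [DL, h, ih]

lemma ZL_proj : ∀ (bs : List (String × Int × Int)),
    ZL bs = ((bs.map (fun b => (b.1, b.2.2))).filter (fun b => b.1 == "zero")).map (fun b => b.2) := by
  intro bs
  induction bs with
  | nil => simp [ZL]
  | cons b rest ih =>
    by_cases hd : b.1 == "data"
    · have hz : (b.1 == "zero") = false := by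
        simp_all
      simp [ZL, hd, hz, ih]
    · by_cases hz : b.1 == "zero" <;> simp [ZL, hd, hz, ih]

lemma PL_proj : ∀ (bs : List (String × Int × Int)),
    PL bs = (((bs.map (fun b => (b.1, b.2.2))).zip (bs.map (fun b => (b.1, b.2.2))).tail).filterMap
      (fun p => if p.1.1 == "data" && p.2.1 == "zero" then some (p.1.2 + p.2.2) else none)) := by
  intro bs
  induction bs with
  | nil => simp [PL]
  | cons b rest ih =>
    cases rest with
    | nil => simp [PL]
    | cons nb r =>
      have hzip : ((List.map (fun b => (b.1, b.2.2)) (b :: nb :: r)).zip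
          (List.map (fun b => (b.1, b.2.2)) (b :: nb :: r)).tail)
          = ((b.1, b.2.2), (nb.1, nb.2.2)) ::
            ((List.map (fun b => (b.1, b.2.2)) (nb :: r)).zip
              (List.map (fun b => (b.1, b.2.2)) (nb :: r)).tail) := by
        simp
      rw [hzip, List.filterMap_cons, ← ih]
      by_cases hd : b.1 == "data" <;> by_cases hz : nb.1 == "zero" <;>
        simp [PL, hd, hz]

-- ===== VERDICT (by name: the statement is the Claim_ definition above) =====
theorem analyze_block_structure_spec : Claim_equal_analyze_block_structure := by
  intro data m _
  unfold Spec_analyze_block_structure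
  cases data with
  | nil => simp [analyze_block_structure, analyze_block_structure_alt, altBlocks]
  | cons d t =>
    unfold analyze_block_structure analyze_block_structure_alt
    simp only [List.isEmpty_cons, if_neg Bool.false_ne_true, List.headD_cons]
    have h := aFold_spec m (d :: t) (d == 0) 0 0 []
    simp only [Int.zero_add, Int.add_zero] at h
    set s := (d :: t).foldl (aStep m) (0, 0, (d == 0), []) with hs
    have hpos : s.1 = ((d :: t).length : Int) := by
      have := h.1; omega
    have hblocks :
        (if ((d :: t).length : Int) - s.2.1 > 0 then
          (if s.2.2.1 then
            (if ((d :: t).length : Int) - s.2.1 ≥ m then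
              s.2.2.2 ++ [("zero", s.2.1, ((d :: t).length : Int) - s.2.1)] else s.2.2.2)
           else s.2.2.2 ++ [("data", s.2.1, ((d :: t).length : Int) - s.2.1)])
         else s.2.2.2) = specBlocks m (d == 0) 0 0 (d :: t) := by
      rw [append_mkBlk]
      rw [← hpos] at *
      have := h.2
      simpa using this
    rw [hblocks]
    rw [aAn_spec (specBlocks m (d == 0) 0 0 (d :: t)) [] [] []]
    have hproj : (specBlocks m (d == 0) 0 0 (d :: t)).map (fun b => (b.1, b.2.2)) =
        altBlocks m (d :: t) := by
      rw [spec_proj, cf_alt_top]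
    simp only [List.nil_append]
    rw [DL_proj, ZL_proj, PL_proj, hproj]
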